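-- pv_equiv track=rewrite | github.com/semyonvlasov/steamdeck_mirror_controls | main.py | _expand_case_pairs
-- ===== SOURCE A (Python) =====
-- def _expand_case_pairs(pairs: list[tuple[str, str]]) -> list[tuple[str, str]]:
--     out: list[tuple[str, str]] = []
--     seen: set[tuple[str, str]] = set()
--     for left, right in pairs:
--         variants = [
--             (left, right),
--             (left.upper(), right.upper()),
--         ]
--         for variant in variants:
--             if variant in seen:
--                 continue
--             seen.add(variant)
--             out.append(variant)
--     return out
-- ===== SOURCE B (Python) =====
-- def _expand_case_pairs(pairs: list[tuple[str, str]]) -> list[tuple[str, str]]: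
--     # Pass 1: fully expand every pair with its uppercase variant.
--     remaining = [v for left, right in pairs
--                    for v in ((left, right), (left.upper(), right.upper()))]
--     # Pass 2: selection-style dedup — repeatedly take the front element and
--     # filter every occurrence of it out of the remaining list.  No seen-set.
--     out: list[tuple[str, str]] = []
--     while remaining:
--         head = remaining[0]
--         out.append(head)
--         remaining = [v for v in remaining if v != head]
--     return out
-- ===== Notes on version B (the rewrite author's own statement) =====
-- stated objective: alternative
-- what changed: Replaces A's single pass with a seen-set and continue branch by a staged algorithm: first fully expand all pairs, then deduplicate by selection - repeatedly take the front element and filter all its occurrences out of the remaining list, so no auxiliary membership structure exists at all.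
import Mathlib
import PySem

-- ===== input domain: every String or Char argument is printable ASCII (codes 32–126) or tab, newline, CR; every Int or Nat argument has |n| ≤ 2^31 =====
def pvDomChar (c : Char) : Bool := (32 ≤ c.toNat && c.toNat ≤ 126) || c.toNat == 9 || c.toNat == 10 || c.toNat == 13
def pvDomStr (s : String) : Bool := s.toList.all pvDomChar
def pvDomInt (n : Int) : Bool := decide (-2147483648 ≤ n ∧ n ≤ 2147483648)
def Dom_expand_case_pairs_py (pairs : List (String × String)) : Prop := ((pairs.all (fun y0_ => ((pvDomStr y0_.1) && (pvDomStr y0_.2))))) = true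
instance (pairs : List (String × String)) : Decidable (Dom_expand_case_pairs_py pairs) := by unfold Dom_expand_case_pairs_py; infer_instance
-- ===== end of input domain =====

-- B replaces A's single-pass seen-set loop by a staged algorithm: full expansion first,
-- then selection-style dedup by repeated filtering (no auxiliary membership structure);
-- alternative decomposition, same exact result.


-- ===== PORT A =====
-- literal port of A: one pass, appending each variant to `out` unless it is in `seen`
def expand_case_pairs_py (pairs : List (String × String)) : List (String × String) :=
  (pairs.foldl
    (fun (st : List (String × String) × PySem.Set (String × String)) lr =>
      let variants : List (String × String) :=
        [(lr.1, lr.2), (PySem.Str.upper lr.1, PySem.Str.upper lr.2)]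
      variants.foldl
        (fun st v =>
          if PySem.Set.contains st.2 v then st
          else (st.1 ++ [v], PySem.Set.add st.2 v))
        st)
    ([], PySem.Set.empty)).1

-- ===== PORT B =====
-- B's while-loop: take the front element, filter all its occurrences out, repeat.
def pvDedupSelect : List (String × String) → List (String × String)
  | [] => []
  | x :: xs => x :: pvDedupSelect (List.filter (fun v => v ≠ x) (x :: xs))
termination_by xs => xs.length
decreasing_by
  simp only [List.filter_cons, decide_not, ne_eq, List.length_cons]
  exact Nat.lt_succ_of_le (List.length_filter_le _ _)

-- port of B: expand everything with flatMap, then the selection loop above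
def expand_case_pairs_py_alt (pairs : List (String × String)) : List (String × String) :=
  pvDedupSelect
    (pairs.flatMap (fun lr => [(lr.1, lr.2), (PySem.Str.upper lr.1, PySem.Str.upper lr.2)]))

-- ===== PRECONDITION & SPEC =====
def Spec_expand_case_pairs_py (pairs : List (String × String)) (out : List (String × String)) : Prop := out = expand_case_pairs_py_alt pairs
instance (pairs : List (String × String)) (out : List (String × String)) : Decidable (Spec_expand_case_pairs_py pairs out) := by unfold Spec_expand_case_pairs_py; infer_instance

-- ===== CLAIM =====
def Claim_equal_expand_case_pairs_py : Prop := ∀ (pairs : List (String × String)), Dom_expand_case_pairs_py pairs → Spec_expand_case_pairs_py pairs (expand_case_pairs_py pairs)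

-- ===== LEMMAS AND PROOFS =====

-- A's inner step, started on a state whose `out` and `seen` coincide, is Set.add on both.
theorem pv_step_eq (s : PySem.Set (String × String)) (v : String × String) :
    (if PySem.Set.contains s v then ((s : List (String × String)), s)
     else (s ++ [v], PySem.Set.add s v)) = (PySem.Set.add s v, PySem.Set.add s v) := by
  by_cases h : v ∈ (s : List (String × String))
  · simp [PySem.Set.add, h]
  · simp [PySem.Set.add, h]

-- A's whole fold keeps out = seen and equals foldl Set.add over the flattened variants.
theorem pv_fold_eq (pairs : List (String × String))
    (s : PySem.Set (String × String)) :
    (pairs.foldl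
      (fun (st : List (String × String) × PySem.Set (String × String)) lr =>
        let variants : List (String × String) :=
          [(lr.1, lr.2), (PySem.Str.upper lr.1, PySem.Str.upper lr.2)]
        variants.foldl
          (fun st v =>
            if PySem.Set.contains st.2 v then st
            else (st.1 ++ [v], PySem.Set.add st.2 v))
          st)
      (s, s))
    = (((pairs.flatMap
          (fun lr => [(lr.1, lr.2), (PySem.Str.upper lr.1, PySem.Str.upper lr.2)])).foldl
          PySem.Set.add s),
       ((pairs.flatMap
          (fun lr => [(lr.1, lr.2), (PySem.Str.upper lr.1, PySem.Str.upper lr.2)])).foldl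
          PySem.Set.add s)) := by
  induction pairs generalizing s with
  | nil => simp
  | cons p rest ih =>
    have h1 := pv_step_eq s (p.1, p.2)
    have h2 := pv_step_eq (PySem.Set.add s (p.1, p.2))
      (PySem.Str.upper p.1, PySem.Str.upper p.2)
    simp only [List.foldl_cons, List.flatMap_cons, List.foldl_append]
    rw [show (if PySem.Set.contains s (p.1, p.2) then (↑s, s)
          else (↑s ++ [(p.1, p.2)], PySem.Set.add s (p.1, p.2)))
        = (PySem.Set.add s (p.1, p.2), PySem.Set.add s (p.1, p.2)) from h1]
    rw [show (if PySem.Set.contains (PySem.Set.add s (p.1, p.2))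
            (PySem.Str.upper p.1, PySem.Str.upper p.2)
          then ((PySem.Set.add s (p.1, p.2) : List (String × String)), PySem.Set.add s (p.1, p.2))
          else ((PySem.Set.add s (p.1, p.2) : List (String × String)) ++ [(PySem.Str.upper p.1, PySem.Str.upper p.2)],
                PySem.Set.add (PySem.Set.add s (p.1, p.2)) (PySem.Str.upper p.1, PySem.Str.upper p.2)))
        = (PySem.Set.add (PySem.Set.add s (p.1, p.2)) (PySem.Str.upper p.1, PySem.Str.upper p.2),
           PySem.Set.add (PySem.Set.add s (p.1, p.2)) (PySem.Str.upper p.1, PySem.Str.upper p.2)) from h2]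
    exact ih _

-- the selection loop drops the head from the surviving list before recursing
theorem pvDedupSelect_cons (x : String × String) (xs : List (String × String)) :
    pvDedupSelect (x :: xs) = x :: pvDedupSelect (xs.filter (fun v => v ≠ x)) := by
  rw [pvDedupSelect]
  simp

-- foldl Set.add s, seeded with an accumulator s, is s followed by the selection dedup
-- of the not-yet-seen elements.
theorem pv_foldl_add_eq_select (xs : List (String × String)) (s : PySem.Set (String × String)) :
    (xs.foldl PySem.Set.add s : List (String × String))
      = (s : List (String × String)) ++ pvDedupSelect (xs.filter (fun v => v ∉ (s : List (String × String)))) := by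
  induction hn : xs.length using Nat.strong_induction_on generalizing xs s with
  | _ n ih =>
    cases xs with
    | nil => simp [pvDedupSelect]
    | cons x xs =>
      by_cases hx : x ∈ (s : List (String × String))
      · have hadd : PySem.Set.add s x = s := by simp [PySem.Set.add, hx]
        simp only [List.foldl_cons, hadd, List.filter_cons, hx, not_true, decide_false]
        exact ih xs.length (by simp [← hn]) xs s rfl
      · have hadd : (PySem.Set.add s x : List (String × String)) = s ++ [x] := by
          simp [PySem.Set.add, hx]
        have hfil : (xs.filter (fun v => v ∉ ((PySem.Set.add s x : List (String × String)))))
            = (xs.filter (fun v => v ∉ (s : List (String × String)))).filter (fun v => v ≠ x) := by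
          rw [List.filter_filter]
          apply List.filter_congr
          intro v _
          by_cases h1 : v = x <;> by_cases h2 : v ∈ (s : List (String × String)) <;>
            simp [hadd, h1, h2]
        have ihx := ih xs.length (by simp [← hn]) xs (PySem.Set.add s x) rfl
        have hcons : (x :: xs).filter (fun v => v ∉ (s : List (String × String)))
            = x :: xs.filter (fun v => v ∉ (s : List (String × String))) := by
          simp [hx]
        rw [List.foldl_cons, ihx, hfil, hadd, hcons, pvDedupSelect_cons]
        simp

-- ===== VERDICT =====
theorem expand_case_pairs_py_spec : Claim_equal_expand_case_pairs_py := by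
  intro pairs _
  unfold Spec_expand_case_pairs_py expand_case_pairs_py expand_case_pairs_py_alt
  rw [show (([] : List (String × String)), (PySem.Set.empty : PySem.Set (String × String)))
      = ((PySem.Set.empty : PySem.Set (String × String)), (PySem.Set.empty : PySem.Set (String × String))) from rfl,
    pv_fold_eq]
  have := pv_foldl_add_eq_select
    (pairs.flatMap (fun lr => [(lr.1, lr.2), (PySem.Str.upper lr.1, PySem.Str.upper lr.2)]))
    PySem.Set.empty
  simp only [PySem.Set.empty] at this ⊢
  simpa using this
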